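-- pv_equiv track=rewrite | github.com/amaheshatunc/comp110-23f-workspace | lessons/odd_and_even.py | odd_and_even1
-- ===== SOURCE A (Python) =====
-- def odd_and_even1(list1: list[int]) -> list[int]:
--         """Find the odd elements with even indexes."""
--         i: int = 0
--         list2: list[int] = []
--
--         while i < len(list1):
--             if list1[i] % 2 != 0 and i % 2 == 0:
--                 list2.append(list1[i])
--             i += 1
--
--         return list2
-- ===== SOURCE B (Python) =====
-- def odd_and_even1(list1: list[int]) -> list[int]:
--     """Find the odd elements with even indexes."""
--     return [x for x in list1[::2] if x % 2 != 0]
-- ===== Notes on version B (the rewrite author's own statement) =====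
-- stated objective: idiomatic
-- what changed: Replaced the index-counting while loop with its two-condition (value-odd AND index-even) test by a stride slice list1[::2] that takes every second element, followed by a single filter on oddness, so no index is ever examined.
import Mathlib
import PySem

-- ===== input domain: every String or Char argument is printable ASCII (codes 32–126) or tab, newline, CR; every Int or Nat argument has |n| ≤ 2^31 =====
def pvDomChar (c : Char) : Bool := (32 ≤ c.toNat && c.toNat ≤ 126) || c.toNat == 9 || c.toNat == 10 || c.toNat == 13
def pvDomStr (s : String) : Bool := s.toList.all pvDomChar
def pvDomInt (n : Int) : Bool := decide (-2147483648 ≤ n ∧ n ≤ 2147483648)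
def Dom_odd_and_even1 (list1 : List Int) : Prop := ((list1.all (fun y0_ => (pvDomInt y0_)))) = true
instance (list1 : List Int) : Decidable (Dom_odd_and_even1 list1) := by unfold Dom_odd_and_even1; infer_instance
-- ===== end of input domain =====

-- B replaces the index-counting while loop (value-odd AND index-even test) by the stride
-- slice list1[::2] followed by a filter on oddness; the index test disappears.


-- ===== PORT A =====
-- while loop of A; Python's i is an int that starts at 0 and only increments,
-- so it is carried as a Nat; list1[i] with i < len is total (getD never hits its default).
def oddEvenLoopA (list1 : List Int) (i : Nat) (list2 : List Int) : List Int :=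
  if i < list1.length then
    oddEvenLoopA list1 (i + 1)
      (if list1.getD i 0 % 2 ≠ 0 ∧ i % 2 = 0 then list2 ++ [list1.getD i 0] else list2)
  else list2
termination_by list1.length - i

def odd_and_even1 (list1 : List Int) : List Int :=
  oddEvenLoopA list1 0 []

-- ===== PORT B =====
-- list1[::2] is the PySem stride slice; a step-2 slice never returns none (step ≠ 0),
-- so the none branch is unreachable.
def odd_and_even1_alt (list1 : List Int) : List Int :=
  match PySem.List.slice? list1 none none 2 with
  | some ys => ys.filter (fun x => decide (x % 2 ≠ 0))
  | none => []

-- ===== PRECONDITION & SPEC =====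
def Spec_odd_and_even1 (list1 : List Int) (out : List Int) : Prop := out = odd_and_even1_alt list1
instance (list1 : List Int) (out : List Int) : Decidable (Spec_odd_and_even1 list1 out) := by unfold Spec_odd_and_even1; infer_instance

-- ===== CLAIM (what is proved, stated in full; the proofs are below) =====
def Claim_equal_odd_and_even1 : Prop := ∀ (list1 : List Int), Dom_odd_and_even1 list1 → Spec_odd_and_even1 list1 (odd_and_even1 list1)

-- ===== LEMMAS AND PROOFS =====

-- every second element, starting with the head
def everyOther {α : Type} : List α → List α
  | [] => []
  | [x] => [x]
  | x :: _ :: rest => x :: everyOther rest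

-- picks from the list with a parity flag: p = "current index is even"
def pickPar (l : List Int) (p : Bool) : List Int :=
  match l with
  | [] => []
  | x :: xs => (if x % 2 ≠ 0 ∧ p then [x] else []) ++ pickPar xs (!p)

theorem oddEvenLoopA_eq (list1 : List Int) (i : Nat) (list2 : List Int) :
    oddEvenLoopA list1 i list2 = list2 ++ pickPar (list1.drop i) (decide (i % 2 = 0)) := by
  by_cases h : i < list1.length
  · rw [oddEvenLoopA, if_pos h, oddEvenLoopA_eq list1 (i + 1)]
    have hd : list1.drop i = list1.getD i 0 :: list1.drop (i + 1) := by
      rw [List.getD_eq_getElem list1 0 h, List.drop_eq_getElem_cons h]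
    rw [hd, pickPar]
    have hp : (!decide (i % 2 = 0)) = decide ((i + 1) % 2 = 0) := by
      rcases Nat.even_or_odd i with he | ho
      · simp [Nat.even_iff.mp he, Nat.succ_mod_two_eq_one_iff.mpr (Nat.even_iff.mp he)]
      · simp [Nat.odd_iff.mp ho, Nat.succ_mod_two_eq_zero_iff.mpr (Nat.odd_iff.mp ho)]
    rw [hp]
    split_ifs with h1 h2 h2 <;> simp_all
  · rw [oddEvenLoopA, if_neg h, List.drop_eq_nil_of_le (Nat.le_of_not_lt h), pickPar]
    simp
termination_by list1.length - i

theorem range_filterMap_everyOther {α : Type} (xs : List α) :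
    (List.range ((xs.length + 1) / 2)).filterMap
        (fun (k : Nat) => xs[((2:Int) * (k:Int)).toNat]?) = everyOther xs := by
  match xs with
  | [] => simp [everyOther]
  | [x] => simp [everyOther, List.range_succ]
  | x :: y :: rest =>
      have hc : ((x :: y :: rest).length + 1) / 2 = (rest.length + 1) / 2 + 1 := by
        simp; omega
      rw [hc, List.range_succ_eq_map, List.filterMap_cons, List.filterMap_map]
      have h0 : ((x :: y :: rest)[((2:Int) * ((0:Nat):Int)).toNat]?) = some x := by norm_num
      rw [h0]
      have hf : (fun (k : Nat) => (x :: y :: rest)[((2:Int) * (k:Int)).toNat]?) ∘ Nat.succ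
          = fun (k : Nat) => rest[((2:Int) * (k:Int)).toNat]? := by
        funext k
        have h1 : ((2:Int) * ((Nat.succ k : Nat):Int)).toNat = 2 * k + 2 := by
          omega
        have h2 : ((2:Int) * ((k:Nat):Int)).toNat = 2 * k := by omega
        simp only [Function.comp, h1, h2]
        rfl
      rw [hf, range_filterMap_everyOther rest, everyOther]
termination_by xs.length

-- the step-2 full slice is everyOther
theorem slice?_two {α : Type} (xs : List α) :
    PySem.List.slice? xs none none 2 = some (everyOther xs) := by
  unfold PySem.List.slice? PySem.List.sliceIndices
  norm_num
  have hcount : (if 0 < xs.length then (((xs.length:Int) + 2 - 1) / 2).toNat else 0)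
      = (xs.length + 1) / 2 := by
    split_ifs with h <;> omega
  rw [hcount]
  exact range_filterMap_everyOther xs

theorem alt_eq_pickPar (l : List Int) : odd_and_even1_alt l = pickPar l true := by
  rw [odd_and_even1_alt, slice?_two]
  show (everyOther l).filter (fun x => decide (x % 2 ≠ 0)) = pickPar l true
  match l with
  | [] => rfl
  | [x] =>
      show (everyOther [x]).filter _ = _
      simp only [everyOther, pickPar, List.filter]
      by_cases hx : x % 2 ≠ 0 <;> simp [hx]
  | x :: y :: rest =>
      show (everyOther (x :: y :: rest)).filter (fun x => decide (x % 2 ≠ 0)) = _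
      rw [everyOther]
      simp only [List.filter_cons]
      have ih : (everyOther rest).filter (fun x => decide (x % 2 ≠ 0)) = pickPar rest true := by
        have := alt_eq_pickPar rest
        rwa [odd_and_even1_alt, slice?_two] at this
      rw [pickPar, pickPar, ih]
      by_cases hx : x % 2 ≠ 0 <;> simp [hx]
termination_by l.length

-- ===== VERDICT (by name: the statement is the Claim_ definition above) =====
theorem odd_and_even1_spec : Claim_equal_odd_and_even1 := by
  intro list1 _
  show odd_and_even1 list1 = odd_and_even1_alt list1
  rw [odd_and_even1, oddEvenLoopA_eq, alt_eq_pickPar]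
  simp
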